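-- pv_equiv track=rewrite | github.com/Florinel-B/programacion | 9.practica8.py | contadorletras
-- ===== SOURCE A (Python) =====
-- def contadorletras(frase):
--     d={}
--     a=[]
--     for i in frase:
--         if i in d:
--             a.append(i)
--             d[i]= d[i]+[len(a)]
--         else :
--             a.append(i)
--             d[i]= [len(a)]
--     return d
-- ===== SOURCE B (Python) =====
-- def contadorletras(frase):
--     return {c: [i + 1 for i, x in enumerate(frase) if x == c]
--             for c in dict.fromkeys(frase)}
-- ===== Notes on version B (the rewrite author's own statement) =====
-- stated objective: idiomatic
-- what changed: Replaces A's single accumulating pass (counter list a, and d[i]=d[i]+[...] which copies the whole positions list on every repeated character) by a dict comprehension: keys in first-appearance order via dict.fromkeys, positions collected per character with an enumerate scan that appends instead of copying.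
import Mathlib
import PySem

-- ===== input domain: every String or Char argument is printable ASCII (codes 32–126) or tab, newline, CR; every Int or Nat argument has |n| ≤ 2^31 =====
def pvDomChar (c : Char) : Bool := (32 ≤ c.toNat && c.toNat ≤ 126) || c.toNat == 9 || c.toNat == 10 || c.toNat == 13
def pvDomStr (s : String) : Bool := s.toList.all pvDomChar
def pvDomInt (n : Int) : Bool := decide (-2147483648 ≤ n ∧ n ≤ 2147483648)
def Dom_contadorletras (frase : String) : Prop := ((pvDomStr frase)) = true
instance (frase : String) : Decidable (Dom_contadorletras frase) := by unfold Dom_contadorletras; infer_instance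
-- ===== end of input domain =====

-- B is the same task written idiomatically (dict comprehension over dict.fromkeys with a per-character
-- enumerate scan) instead of A's single accumulating pass with its counter list; return value only.

-- ===== PORT A =====
-- A's loop: d a dict, a the list of all characters seen so far (only its length is ever read).
def contadorletras (frase : String) : List (String × List Int) :=
  let st := (frase.toList.map (fun c => String.ofList [c])).foldl
    (fun (st : PySem.Dict String (List Int) × List String) i =>
      if st.1.contains i then
        let a' := st.2 ++ [i]
        (st.1.insert i (st.1.getD i [] ++ [(a'.length : Int)]), a')
      else
        let a' := st.2 ++ [i]
        (st.1.insert i [(a'.length : Int)], a'))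
    (PySem.Dict.empty, [])
  st.1.items

-- ===== PORT B =====
def contadorletras_alt (frase : String) : List (String × List Int) :=
  let l := frase.toList.map (fun c => String.ofList [c])
  (PySem.List.dedup l).map (fun c =>
    (c, ((PySem.List.enumerate l 0).filter (fun p => p.2 == c)).map (fun p => p.1 + 1)))

-- ===== PRECONDITION & SPEC =====
def Spec_contadorletras (frase : String) (out : List (String × List Int)) : Prop := out = contadorletras_alt frase
instance (frase : String) (out : List (String × List Int)) : Decidable (Spec_contadorletras frase out) := by unfold Spec_contadorletras; infer_instance

-- ===== CLAIM (what is proved, stated in full; the proofs are below) =====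
def Claim_equal_contadorletras : Prop := ∀ (frase : String), Dom_contadorletras frase → Spec_contadorletras frase (contadorletras frase)

-- ===== LEMMAS AND PROOFS =====

-- 1-indexed positions of c in l, as B computes them.
def pvPos (l : List String) (c : String) : List Int :=
  ((PySem.List.enumerate l 0).filter (fun p => p.2 == c)).map (fun p => p.1 + 1)

lemma pvPos_append (l : List String) (x c : String) :
    pvPos (l ++ [x]) c
      = pvPos l c ++ (if c = x then [(l.length : Int) + 1] else []) := by
  simp only [pvPos, PySem.List.enumerate_append, List.filter_append, List.map_append]
  congr 1
  rw [PySem.List.enumerate_cons, PySem.List.enumerate_nil]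
  by_cases h : c = x
  · subst h; simp
  · simp [Ne.symm h, h]

lemma pvFilter_of_not_mem (l : List String) (c : String) (h : c ∉ l) (s : Int) :
    (PySem.List.enumerate l s).filter (fun p => p.2 == c) = [] := by
  induction l generalizing s with
  | nil => simp [PySem.List.enumerate_nil]
  | cons y ys ih =>
      simp only [List.mem_cons, not_or] at h
      rw [PySem.List.enumerate_cons, List.filter_cons]
      simp [Ne.symm h.1, ih h.2]

lemma pvPos_of_not_mem (l : List String) (c : String) (h : c ∉ l) : pvPos l c = [] := by
  simp [pvPos, pvFilter_of_not_mem l c h 0]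

-- The loop invariant of A: after processing l, the dict's items list is the first-occurrence
-- dedup of l paired with each character's 1-indexed positions, and the counter list a is l itself.
lemma pvLoopA (l : List String) :
    l.foldl
      (fun (st : PySem.Dict String (List Int) × List String) i =>
        if st.1.contains i then
          let a' := st.2 ++ [i]
          (st.1.insert i (st.1.getD i [] ++ [(a'.length : Int)]), a')
        else
          let a' := st.2 ++ [i]
          (st.1.insert i [(a'.length : Int)], a'))
      (PySem.Dict.empty, [])
    = (PySem.Dict.mk ((PySem.Set.ofList l).map (fun c => (c, pvPos l c))), l) := by
  induction l using List.reverseRecOn with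
  | nil => rfl
  | append_singleton l x ih =>
      rw [List.foldl_append, ih, List.foldl_cons, List.foldl_nil]
      have hkeys : (PySem.Dict.mk ((PySem.Set.ofList l).map (fun c => (c, pvPos l c)))).keys
          = PySem.Set.ofList l := by
        simp [PySem.Dict.keys, List.map_map, Function.comp_def]
      have hnd : (PySem.Dict.mk ((PySem.Set.ofList l).map (fun c => (c, pvPos l c)))).keys.Nodup := by
        rw [hkeys]; exact PySem.Set.nodup_ofList l
      have hcont : (PySem.Dict.mk ((PySem.Set.ofList l).map (fun c => (c, pvPos l c)))).contains x
          = decide (x ∈ l) := by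
        rw [PySem.Dict.contains_eq_decide_mem_keys, hkeys]
        simp [PySem.Set.mem_ofList]
      by_cases hx : x ∈ l
      · -- x already a key: insert overwrites in place
        simp only [hcont, hx, decide_true, if_pos]
        have hmem : (x, pvPos l x) ∈ (PySem.Set.ofList l).map (fun c => (c, pvPos l c)) :=
          List.mem_map_of_mem ((PySem.Set.mem_ofList l x).mpr hx)
        have hgetD : (PySem.Dict.mk ((PySem.Set.ofList l).map (fun c => (c, pvPos l c)))).getD x []
            = pvPos l x := PySem.Dict.getD_of_mem_items _ hmem hnd []
        have hset : PySem.Set.ofList (l ++ [x]) = PySem.Set.ofList l := by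
          rw [PySem.Set.ofList_append_singleton, PySem.Set.add]
          simp [PySem.Set.contains, PySem.Set.mem_ofList, hx]
        apply Prod.ext
        · apply PySem.Dict.ext
          rw [PySem.Dict.items_insert_of_contains _ _ (by rw [hcont]; simp [hx]), hgetD]
          show ((PySem.Set.ofList l).map (fun c => (c, pvPos l c))).map _
              = (PySem.Set.ofList (l ++ [x])).map (fun c => (c, pvPos (l ++ [x]) c))
          rw [hset, List.map_map]
          apply List.map_congr_left
          intro c _
          by_cases hcx : c = x
          · subst hcx
            simp [pvPos_append, List.length_append]
          · simp [hcx, pvPos_append]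
        · rfl
      · -- x a fresh key: insert appends
        simp only [hcont, hx, decide_false, if_neg, Bool.false_eq_true, not_false_iff]
        have hset : PySem.Set.ofList (l ++ [x]) = PySem.Set.ofList l ++ [x] := by
          rw [PySem.Set.ofList_append_singleton, PySem.Set.add]
          simp [PySem.Set.contains, PySem.Set.mem_ofList, hx]
        apply Prod.ext
        · apply PySem.Dict.ext
          rw [PySem.Dict.items_insert_of_not_contains _ _ (by rw [hcont]; simp [hx])]
          show ((PySem.Set.ofList l).map (fun c => (c, pvPos l c))) ++ _
              = (PySem.Set.ofList (l ++ [x])).map (fun c => (c, pvPos (l ++ [x]) c))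
          rw [hset, List.map_append]
          congr 1
          · apply List.map_congr_left
            intro c hc
            have hcx : c ≠ x := fun h => hx (h ▸ (PySem.Set.mem_ofList l c).mp hc)
            simp [pvPos_append, hcx]
          · simp [pvPos_append, pvPos_of_not_mem l x hx, List.length_append]
        · rfl

-- ===== VERDICT (by name: the statement is the Claim_ definition above) =====
theorem contadorletras_spec : Claim_equal_contadorletras := by
  intro frase _
  show contadorletras frase = contadorletras_alt frase
  unfold contadorletras contadorletras_alt
  rw [pvLoopA]
  simp [pvPos, PySem.List.dedup_eq_ofList]
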